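-- pv_equiv track=rewrite | github.com/cjx070707/acne-rag-assistant | eval/eval_retrieval.py | match_gold
-- ===== SOURCE A (Python) =====
-- from typing import List, Dict, Any, Tuple, Optional
--
-- def match_gold(
--     retrieved_chunk_ids: List[str],
--     chunk_lookup: Dict[str, Dict[str, Any]],
--     gold_contains: Optional[str],
--     gold_doc_id: Optional[str],
--     gold_doc_ids: Optional[List[str]],
-- ) -> Tuple[bool, Optional[int]]:
--     """
--     Returns (hit, rank_1_based_if_hit).
--     Hit rule priority:
--       1) gold_contains: any retrieved chunk text contains it
--       2) gold_doc_ids: any retrieved chunk doc_id in set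
--       3) gold_doc_id: any retrieved chunk doc_id matches
--     """
--     gc = (gold_contains or "").strip().lower()
--     gset = set(gold_doc_ids or [])
--     gd = (gold_doc_id or "").strip()
--
--     for i, cid in enumerate(retrieved_chunk_ids):
--         c = chunk_lookup.get(cid)
--         if not c:
--             continue
--
--         if gc:
--             text = (c.get("text") or "").lower()
--             if gc in text:
--                 return True, i + 1
--
--         doc = c.get("doc_id")
--         if gset and doc in gset:
--             return True, i + 1
--
--         if (not gset) and gd and doc == gd:
--             return True, i + 1
--
--     return False, None
-- ===== SOURCE B (Python) =====
-- from typing import List, Dict, Any, Tuple, Optional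
--
-- def match_gold(
--     retrieved_chunk_ids: List[str],
--     chunk_lookup: Dict[str, Dict[str, Any]],
--     gold_contains: Optional[str],
--     gold_doc_id: Optional[str],
--     gold_doc_ids: Optional[List[str]],
-- ) -> Tuple[bool, Optional[int]]:
--     gtext = (gold_contains or "").strip().lower()
--     gset = set(gold_doc_ids or [])
--     gd = (gold_doc_id or "").strip()
--
--     def first_rank(pred):
--         for i, cid in enumerate(retrieved_chunk_ids):
--             c = chunk_lookup.get(cid)
--             if c and pred(c):
--                 return i + 1
--         return None
--
--     rank_contains = None
--     if gtext:
--         rank_contains = first_rank(lambda c: gtext in (c.get("text") or "").lower())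
--
--     rank_doc = None
--     if gset:
--         rank_doc = first_rank(lambda c: c.get("doc_id") in gset)
--     elif gd:
--         rank_doc = first_rank(lambda c: c.get("doc_id") == gd)
--
--     ranks = [r for r in (rank_contains, rank_doc) if r is not None]
--     if not ranks:
--         return False, None
--     return True, min(ranks)
-- ===== Notes on version B (the rewrite author's own statement) =====
-- stated objective: alternative
-- what changed: A's single early-exit loop that tests all three gold criteria per retrieved chunk is replaced by two criterion-specific scans (first rank of a contains-hit, first rank of a doc-id-hit) whose results are combined by min.
import Mathlib
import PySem

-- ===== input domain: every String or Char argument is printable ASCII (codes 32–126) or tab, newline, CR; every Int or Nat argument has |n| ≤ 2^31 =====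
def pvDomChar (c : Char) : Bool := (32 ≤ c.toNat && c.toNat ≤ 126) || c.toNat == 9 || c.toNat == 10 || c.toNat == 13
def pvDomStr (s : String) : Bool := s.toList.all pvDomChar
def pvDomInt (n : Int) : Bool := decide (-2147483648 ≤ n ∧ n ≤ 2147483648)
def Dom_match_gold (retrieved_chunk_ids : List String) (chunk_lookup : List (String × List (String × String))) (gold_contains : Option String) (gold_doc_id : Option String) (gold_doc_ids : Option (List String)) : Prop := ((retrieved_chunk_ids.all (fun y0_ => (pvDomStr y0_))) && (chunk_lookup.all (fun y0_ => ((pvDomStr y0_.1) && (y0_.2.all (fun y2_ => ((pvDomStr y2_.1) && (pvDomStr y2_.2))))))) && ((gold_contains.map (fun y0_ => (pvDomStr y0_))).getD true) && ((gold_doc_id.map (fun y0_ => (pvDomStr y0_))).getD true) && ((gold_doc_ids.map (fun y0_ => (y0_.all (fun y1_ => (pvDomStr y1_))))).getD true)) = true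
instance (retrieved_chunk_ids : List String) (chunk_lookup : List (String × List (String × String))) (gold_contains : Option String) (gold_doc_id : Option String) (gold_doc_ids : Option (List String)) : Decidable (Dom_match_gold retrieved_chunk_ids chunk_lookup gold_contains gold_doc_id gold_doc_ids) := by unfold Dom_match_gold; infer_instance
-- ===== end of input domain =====

-- B replaces A's single early-exit disjunctive scan with two criterion-specific
-- scans (rank of the contains-hit, rank of the doc-id-hit) combined by min;
-- objective: alternative decomposition, same asymptotic cost.

-- ===== PORT A =====
-- A's loop: for i, cid in enumerate(...): look up chunk, skip falsy, check the
-- three criteria in order, early-return (True, i+1); else (False, None).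
def matchGoldLoopA (chunk_lookup : List (String × List (String × String))) (gc : String)
    (gset : PySem.Set String) (gd : String) : List String → Int → Bool × Option Int
  | [], _ => (false, none)
  | cid :: rest, i =>
    match PySem.Dict.get? (PySem.Dict.mk chunk_lookup) cid with
    | none => matchGoldLoopA chunk_lookup gc gset gd rest (i + 1)
    | some c =>
      if c = [] then matchGoldLoopA chunk_lookup gc gset gd rest (i + 1)
      else if gc ≠ "" ∧ PySem.Str.isIn gc (PySem.Str.lower ((PySem.Dict.get? (PySem.Dict.mk c) "text").getD "")) then
        (true, some (i + 1))
      else if gset ≠ [] ∧ ((PySem.Dict.get? (PySem.Dict.mk c) "doc_id").map (fun d => PySem.Set.contains gset d)).getD false then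
        (true, some (i + 1))
      else if gset = [] ∧ gd ≠ "" ∧ PySem.Dict.get? (PySem.Dict.mk c) "doc_id" = some gd then
        (true, some (i + 1))
      else matchGoldLoopA chunk_lookup gc gset gd rest (i + 1)

def match_gold (retrieved_chunk_ids : List String) (chunk_lookup : List (String × List (String × String))) (gold_contains : Option String) (gold_doc_id : Option String) (gold_doc_ids : Option (List String)) : Bool × Option Int :=
  let gc := PySem.Str.lower (PySem.Str.strip (gold_contains.getD ""))
  let gset := PySem.Set.ofList (gold_doc_ids.getD [])
  let gd := PySem.Str.strip (gold_doc_id.getD "")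
  matchGoldLoopA chunk_lookup gc gset gd retrieved_chunk_ids 0

-- ===== PORT B =====
-- first_rank(pred): first 1-based index whose chunk exists (truthy) and satisfies pred.
def firstRank (chunk_lookup : List (String × List (String × String)))
    (pred : List (String × String) → Bool) : List String → Int → Option Int
  | [], _ => none
  | cid :: rest, i =>
    match PySem.Dict.get? (PySem.Dict.mk chunk_lookup) cid with
    | none => firstRank chunk_lookup pred rest (i + 1)
    | some c =>
      if c ≠ [] ∧ pred c then some (i + 1)
      else firstRank chunk_lookup pred rest (i + 1)

def match_gold_alt (retrieved_chunk_ids : List String) (chunk_lookup : List (String × List (String × String))) (gold_contains : Option String) (gold_doc_id : Option String) (gold_doc_ids : Option (List String)) : Bool × Option Int :=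
  let gc := PySem.Str.lower (PySem.Str.strip (gold_contains.getD ""))
  let gset := PySem.Set.ofList (gold_doc_ids.getD [])
  let gd := PySem.Str.strip (gold_doc_id.getD "")
  let rank_contains : Option Int :=
    if gc ≠ "" then
      firstRank chunk_lookup (fun c => PySem.Str.isIn gc (PySem.Str.lower ((PySem.Dict.get? (PySem.Dict.mk c) "text").getD ""))) retrieved_chunk_ids 0
    else none
  let rank_doc : Option Int :=
    if gset ≠ [] then
      firstRank chunk_lookup (fun c => ((PySem.Dict.get? (PySem.Dict.mk c) "doc_id").map (fun d => PySem.Set.contains gset d)).getD false) retrieved_chunk_ids 0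
    else if gd ≠ "" then
      firstRank chunk_lookup (fun c => decide (PySem.Dict.get? (PySem.Dict.mk c) "doc_id" = some gd)) retrieved_chunk_ids 0
    else none
  let ranks : List Int :=
    (match rank_contains with | some r => [r] | none => []) ++
    (match rank_doc with | some r => [r] | none => [])
  if ranks = [] then (false, none) else (true, PySem.List.min? ranks (fun x => x))

-- ===== PRECONDITION & SPEC =====
def Spec_match_gold (retrieved_chunk_ids : List String) (chunk_lookup : List (String × List (String × String))) (gold_contains : Option String) (gold_doc_id : Option String) (gold_doc_ids : Option (List String)) (out : Bool × Option Int) : Prop := out = match_gold_alt retrieved_chunk_ids chunk_lookup gold_contains gold_doc_id gold_doc_ids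
instance (retrieved_chunk_ids : List String) (chunk_lookup : List (String × List (String × String))) (gold_contains : Option String) (gold_doc_id : Option String) (gold_doc_ids : Option (List String)) (out : Bool × Option Int) : Decidable (Spec_match_gold retrieved_chunk_ids chunk_lookup gold_contains gold_doc_id gold_doc_ids out) := by unfold Spec_match_gold; infer_instance

-- ===== CLAIM (what is proved, stated in full; the proofs are below) =====
def Claim_equal_match_gold : Prop := ∀ (retrieved_chunk_ids : List String) (chunk_lookup : List (String × List (String × String))) (gold_contains : Option String) (gold_doc_id : Option String) (gold_doc_ids : Option (List String)), Dom_match_gold retrieved_chunk_ids chunk_lookup gold_contains gold_doc_id gold_doc_ids → Spec_match_gold retrieved_chunk_ids chunk_lookup gold_contains gold_doc_id gold_doc_ids (match_gold retrieved_chunk_ids chunk_lookup gold_contains gold_doc_id gold_doc_ids)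

-- ===== LEMMAS AND PROOFS =====

-- proof-side: the per-cid boolean A tests for the 'contains' criterion, resp. the doc criterion
def pPredC (chunk_lookup : List (String × List (String × String))) (gc : String) (cid : String) : Bool :=
  match PySem.Dict.get? (PySem.Dict.mk chunk_lookup) cid with
  | none => false
  | some c => decide (c ≠ []) && (decide (gc ≠ "") && PySem.Str.isIn gc (PySem.Str.lower ((PySem.Dict.get? (PySem.Dict.mk c) "text").getD "")))

def pPredD (chunk_lookup : List (String × List (String × String))) (gset : PySem.Set String) (gd : String) (cid : String) : Bool :=
  match PySem.Dict.get? (PySem.Dict.mk chunk_lookup) cid with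
  | none => false
  | some c => decide (c ≠ []) &&
      ((decide (gset ≠ []) && ((PySem.Dict.get? (PySem.Dict.mk c) "doc_id").map (fun d => PySem.Set.contains gset d)).getD false) ||
       (decide (gset = []) && decide (gd ≠ "") && decide (PySem.Dict.get? (PySem.Dict.mk c) "doc_id" = some gd)))

def genFind (p : String → Bool) : List String → Int → Option Int
  | [], _ => none
  | x :: xs, i => if p x then some (i + 1) else genFind p xs (i + 1)

def combineRanks : Option Int → Option Int → Bool × Option Int
  | none, none => (false, none)
  | some a, none => (true, some a)
  | none, some b => (true, some b)
  | some a, some b => (true, some (min a b))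

theorem genFind_congr (p q : String → Bool) (h : ∀ x, p x = q x) (xs : List String) (i : Int) :
    genFind p xs i = genFind q xs i := by
  induction xs generalizing i with
  | nil => rfl
  | cons x xs ih => simp [genFind, h x, ih]

theorem genFind_false (xs : List String) (i : Int) : genFind (fun _ => false) xs i = none := by
  induction xs generalizing i with
  | nil => rfl
  | cons x xs ih => simp [genFind, ih]

theorem genFind_bound (p : String → Bool) (xs : List String) (i j : Int)
    (h : genFind p xs i = some j) : i < j := by
  induction xs generalizing i with
  | nil => simp [genFind] at h
  | cons x xs ih =>
    simp only [genFind] at h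
    split at h
    · injection h with h; omega
    · have := ih (i + 1) h; omega

theorem loopA_eq_combine (chunk_lookup : List (String × List (String × String))) (gc : String)
    (gset : PySem.Set String) (gd : String) (xs : List String) (i : Int) :
    matchGoldLoopA chunk_lookup gc gset gd xs i =
      combineRanks (genFind (pPredC chunk_lookup gc) xs i) (genFind (pPredD chunk_lookup gset gd) xs i) := by
  induction xs generalizing i with
  | nil => rfl
  | cons cid rest ih =>
    cases hlk : PySem.Dict.get? (PySem.Dict.mk chunk_lookup) cid with
    | none =>
      simp only [matchGoldLoopA, genFind, pPredC, pPredD, hlk]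
      exact ih (i + 1)
    | some c =>
      by_cases hc : c = []
      · subst hc
        simp only [matchGoldLoopA, genFind, pPredC, pPredD, hlk]
        simpa using ih (i + 1)
      · simp only [matchGoldLoopA, genFind, pPredC, pPredD, hlk, hc, ne_eq,
          not_false_eq_true, decide_true, Bool.true_and, if_false,
          Bool.and_eq_true, Bool.or_eq_true, decide_eq_true_eq]
        by_cases hP : ¬gc = "" ∧ PySem.Str.isIn gc (PySem.Str.lower ((PySem.Dict.get? (PySem.Dict.mk c) "text").getD "")) = true
        · rw [if_pos hP, if_pos hP]
          by_cases hQ : (¬gset = [] ∧ (Option.map (fun d => PySem.Set.contains gset d) (PySem.Dict.get? (PySem.Dict.mk c) "doc_id")).getD false = true) ∨ ((gset = [] ∧ ¬gd = "") ∧ PySem.Dict.get? (PySem.Dict.mk c) "doc_id" = some gd)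
          · rw [if_pos hQ]; simp [combineRanks]
          · rw [if_neg hQ]
            rcases hq : genFind (pPredD chunk_lookup gset gd) rest (i + 1) with _ | j
            · simp [combineRanks]
            · have hb := genFind_bound _ rest (i + 1) j hq
              simp [combineRanks, min_eq_left (by omega : (i + 1 : ℤ) ≤ j)]
        · rw [if_neg hP, if_neg hP]
          by_cases hS : ¬gset = [] ∧ (Option.map (fun d => PySem.Set.contains gset d) (PySem.Dict.get? (PySem.Dict.mk c) "doc_id")).getD false = true
          · rw [if_pos hS, if_pos (Or.inl hS)]
            rcases hq : genFind (pPredC chunk_lookup gc) rest (i + 1) with _ | j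
            · simp [combineRanks]
            · have hb := genFind_bound _ rest (i + 1) j hq
              simp [combineRanks, min_eq_right (by omega : (i + 1 : ℤ) ≤ j)]
          · rw [if_neg hS]
            by_cases hD : gset = [] ∧ ¬gd = "" ∧ PySem.Dict.get? (PySem.Dict.mk c) "doc_id" = some gd
            · rw [if_pos hD, if_pos (Or.inr ⟨⟨hD.1, hD.2.1⟩, hD.2.2⟩)]
              rcases hq : genFind (pPredC chunk_lookup gc) rest (i + 1) with _ | j
              · simp [combineRanks]
              · have hb := genFind_bound _ rest (i + 1) j hq
                simp [combineRanks, min_eq_right (by omega : (i + 1 : ℤ) ≤ j)]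
            · rw [if_neg hD, if_neg (fun h => h.elim (fun h => hS h) (fun h => hD ⟨h.1.1, h.1.2, h.2⟩))]
              exact ih (i + 1)

theorem firstRank_eq_genFind (chunk_lookup : List (String × List (String × String)))
    (pred : List (String × String) → Bool) (xs : List String) (i : Int) :
    firstRank chunk_lookup pred xs i =
      genFind (fun cid =>
        match PySem.Dict.get? (PySem.Dict.mk chunk_lookup) cid with
        | none => false
        | some c => decide (c ≠ []) && pred c) xs i := by
  induction xs generalizing i with
  | nil => rfl
  | cons cid rest ih =>
    cases hlk : PySem.Dict.get? (PySem.Dict.mk chunk_lookup) cid with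
    | none =>
      simp only [firstRank, genFind, hlk]
      exact ih (i + 1)
    | some c =>
      simp only [firstRank, genFind, hlk]
      by_cases h : c ≠ [] ∧ pred c = true
      · simp [h.1, h.2]
      · simp only [if_neg h]
        have : ¬ (decide (c ≠ []) && pred c) = true := by
          simp only [Bool.and_eq_true, decide_eq_true_eq]; exact h
        simp only [this]
        exact ih (i + 1)

theorem ranksCombine (o1 o2 : Option Int) :
    (if ((match o1 with | some r => [r] | none => []) ++ (match o2 with | some r => [r] | none => ([] : List Int))) = [] then ((false, none) : Bool × Option Int)
     else (true, PySem.List.min? ((match o1 with | some r => [r] | none => []) ++ (match o2 with | some r => [r] | none => ([] : List Int))) (fun x => x))) = combineRanks o1 o2 := by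
  rcases o1 with _ | a <;> rcases o2 with _ | b <;>
    simp [combineRanks, PySem.List.min?_id_cons]

theorem alt_core (chunk_lookup : List (String × List (String × String))) (ids : List String)
    (gc : String) (gset : PySem.Set String) (gd : String) :
    (let rank_contains : Option Int :=
      if gc ≠ "" then
        firstRank chunk_lookup (fun c => PySem.Str.isIn gc (PySem.Str.lower ((PySem.Dict.get? (PySem.Dict.mk c) "text").getD ""))) ids 0
      else none
    let rank_doc : Option Int :=
      if gset ≠ [] then
        firstRank chunk_lookup (fun c => ((PySem.Dict.get? (PySem.Dict.mk c) "doc_id").map (fun d => PySem.Set.contains gset d)).getD false) ids 0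
      else if gd ≠ "" then
        firstRank chunk_lookup (fun c => decide (PySem.Dict.get? (PySem.Dict.mk c) "doc_id" = some gd)) ids 0
      else none
    let ranks : List Int :=
      (match rank_contains with | some r => [r] | none => []) ++
      (match rank_doc with | some r => [r] | none => [])
    if ranks = [] then ((false, none) : Bool × Option Int) else (true, PySem.List.min? ranks (fun x => x))) =
      combineRanks (genFind (pPredC chunk_lookup gc) ids 0) (genFind (pPredD chunk_lookup gset gd) ids 0) := by
  have h1 : (if gc ≠ "" then
        firstRank chunk_lookup (fun c => PySem.Str.isIn gc (PySem.Str.lower ((PySem.Dict.get? (PySem.Dict.mk c) "text").getD ""))) ids 0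
      else none) = genFind (pPredC chunk_lookup gc) ids 0 := by
    by_cases hgc : gc ≠ ""
    · rw [if_pos hgc, firstRank_eq_genFind]
      refine genFind_congr _ _ (fun cid => ?_) _ _
      simp only [pPredC]
      cases PySem.Dict.get? (PySem.Dict.mk chunk_lookup) cid with
      | none => rfl
      | some c => simp [hgc]
    · rw [if_neg hgc, genFind_congr (pPredC chunk_lookup _) (fun _ => false) (fun cid => ?_) _ _,
        genFind_false]
      simp only [pPredC]
      cases PySem.Dict.get? (PySem.Dict.mk chunk_lookup) cid with
      | none => rfl
      | some c => simp [not_not.mp hgc]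
  have h2 : (if gset ≠ [] then
        firstRank chunk_lookup (fun c => ((PySem.Dict.get? (PySem.Dict.mk c) "doc_id").map (fun d => PySem.Set.contains gset d)).getD false) ids 0
      else if gd ≠ "" then
        firstRank chunk_lookup (fun c => decide (PySem.Dict.get? (PySem.Dict.mk c) "doc_id" = some gd)) ids 0
      else none) = genFind (pPredD chunk_lookup gset gd) ids 0 := by
    by_cases hgs : gset ≠ ([] : List String)
    · rw [if_pos hgs, firstRank_eq_genFind]
      refine genFind_congr _ _ (fun cid => ?_) _ _
      simp only [pPredD]
      cases PySem.Dict.get? (PySem.Dict.mk chunk_lookup) cid with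
      | none => rfl
      | some c => simp [hgs]
    · rw [if_neg hgs]
      by_cases hgd : gd ≠ ""
      · rw [if_pos hgd, firstRank_eq_genFind]
        refine genFind_congr _ _ (fun cid => ?_) _ _
        simp only [pPredD]
        cases PySem.Dict.get? (PySem.Dict.mk chunk_lookup) cid with
        | none => rfl
        | some c => simp [not_not.mp hgs, hgd]
      · rw [if_neg hgd, genFind_congr (pPredD chunk_lookup _ _) (fun _ => false) (fun cid => ?_) _ _,
          genFind_false]
        simp only [pPredD]
        cases PySem.Dict.get? (PySem.Dict.mk chunk_lookup) cid with
        | none => rfl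
        | some c => simp [not_not.mp hgs, not_not.mp hgd]
  simp only [h1, h2]
  exact ranksCombine _ _

theorem alt_eq_combine (retrieved_chunk_ids : List String) (chunk_lookup : List (String × List (String × String))) (gold_contains : Option String) (gold_doc_id : Option String) (gold_doc_ids : Option (List String)) :
    match_gold_alt retrieved_chunk_ids chunk_lookup gold_contains gold_doc_id gold_doc_ids =
      combineRanks
        (genFind (pPredC chunk_lookup (PySem.Str.lower (PySem.Str.strip (gold_contains.getD "")))) retrieved_chunk_ids 0)
        (genFind (pPredD chunk_lookup (PySem.Set.ofList (gold_doc_ids.getD [])) (PySem.Str.strip (gold_doc_id.getD ""))) retrieved_chunk_ids 0) := by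
  have h := alt_core chunk_lookup retrieved_chunk_ids
    (PySem.Str.lower (PySem.Str.strip (gold_contains.getD "")))
    (PySem.Set.ofList (gold_doc_ids.getD []))
    (PySem.Str.strip (gold_doc_id.getD ""))
  simpa only [match_gold_alt] using h

-- ===== VERDICT (by name: the statement is the Claim_ definition above) =====
theorem match_gold_spec : Claim_equal_match_gold := by
  intro ids lookup gcon gdid gdids _
  unfold Spec_match_gold
  rw [alt_eq_combine]
  unfold match_gold
  rw [loopA_eq_combine]
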